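-- pv_equiv track=rewrite | github.com/kipeum86/youtube-briefing | pipeline/summarizers/context_builder.py | _take_prefix
-- ===== SOURCE A (Python) =====
-- def _take_prefix(lines: list[str], budget: int) -> tuple[list[str], int]:
--     selected: list[str] = []
--     used = 0
--     for index, line in enumerate(lines):
--         separator = 1 if selected else 0
--         projected = used + separator + len(line)
--         if projected <= budget:
--             selected.append(line)
--             used = projected
--             continue
--
--         remaining = budget - used - separator
--         if remaining > 0:
--             selected.append(line[:remaining].rstrip())
--             return selected, index + 1
--         return selected, index
--
--     return selected, len(lines)
-- ===== SOURCE B (Python) =====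
-- def _prefix_costs(lines):
--     costs = []
--     total = 0
--     for i, line in enumerate(lines):
--         total += (1 if i else 0) + len(line)
--         costs.append(total)
--     return costs
--
--
-- def _cutoff(cum, budget):
--     k = 0
--     while k < len(cum) and cum[k] <= budget:
--         k += 1
--     return k
--
--
-- def _take_prefix(lines: list[str], budget: int) -> tuple[list[str], int]:
--     cum = _prefix_costs(lines)
--     k = _cutoff(cum, budget)
--     if k == len(lines):
--         return lines[:], len(lines)
--     selected = lines[:k]
--     used = cum[k - 1] if k else 0
--     remaining = budget - used - (1 if k else 0)
--     if remaining > 0: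
--         selected.append(lines[k][:remaining].rstrip())
--         return selected, k + 1
--     return selected, k
-- ===== Notes on version B (the rewrite author's own statement) =====
-- stated objective: alternative
-- what changed: Replaces A's single stateful greedy loop (running 'used'/'selected' with per-iteration branching) by a prefix-sum table of per-line costs plus a separate cutoff scan, deriving the result from the cutoff index k in one three-way case split.
import Mathlib
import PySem

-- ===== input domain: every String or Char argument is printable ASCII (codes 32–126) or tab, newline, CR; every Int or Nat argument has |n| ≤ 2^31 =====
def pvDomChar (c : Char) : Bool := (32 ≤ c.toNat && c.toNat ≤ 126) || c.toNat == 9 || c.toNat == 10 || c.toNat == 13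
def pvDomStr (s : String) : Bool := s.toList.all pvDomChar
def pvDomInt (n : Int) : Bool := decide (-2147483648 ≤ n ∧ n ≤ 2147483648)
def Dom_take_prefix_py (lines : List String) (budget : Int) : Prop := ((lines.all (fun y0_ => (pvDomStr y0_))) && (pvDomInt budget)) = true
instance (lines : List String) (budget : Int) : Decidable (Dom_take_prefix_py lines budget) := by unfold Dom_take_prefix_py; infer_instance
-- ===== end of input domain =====

-- B replaces A's single stateful greedy loop by a prefix-sum table of per-line costs plus a
-- cutoff scan (a different decomposition, same cost); equivalence proved for all inputs.


-- ===== PORT A =====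
-- the for-loop of _take_prefix: state (index, used, selected)
def takePrefixGoA (budget : Int) : List String → Int → Int → List String → List String × Int
  | [], idx, _used, sel => (sel, idx)
  | line :: rest, idx, used, sel =>
    let separator : Int := if sel.isEmpty then 0 else 1
    let projected := used + separator + PySem.Str.len line
    if projected ≤ budget then
      takePrefixGoA budget rest (idx + 1) projected (sel ++ [line])
    else
      let remaining := budget - used - separator
      if remaining > 0 then
        (sel ++ [PySem.Str.rstrip (PySem.Str.slice line none (some remaining))], idx + 1)
      else (sel, idx)

def take_prefix_py (lines : List String) (budget : Int) : List String × Int :=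
  takePrefixGoA budget lines 0 0 []

-- ===== PORT B =====
-- _prefix_costs: running total, cost of line i is (1 if i else 0) + len(line)
def prefixCostsB : List String → Int → Int → List Int
  | [], _, _ => []
  | line :: rest, i, total =>
    let total' := total + (if i = 0 then 0 else 1) + PySem.Str.len line
    total' :: prefixCostsB rest (i + 1) total'

-- _cutoff: count of leading entries ≤ budget (the while loop)
def cutoffB : List Int → Int → Nat
  | [], _ => 0
  | c :: rest, budget => if c ≤ budget then cutoffB rest budget + 1 else 0

def take_prefix_py_alt (lines : List String) (budget : Int) : List String × Int :=
  let cum := prefixCostsB lines 0 0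
  let k := cutoffB cum budget
  if k = lines.length then (lines, (lines.length : Int))
  else
    let selected := lines.take k            -- lines[:k], exact: 0 ≤ k ≤ len(lines)
    let used := if k = 0 then 0 else (PySem.List.pyGet? cum ((k : Int) - 1)).getD 0   -- cum[k-1]; in range, getD totalises
    let remaining := budget - used - (if k = 0 then 0 else 1)
    if remaining > 0 then
      (selected ++ [PySem.Str.rstrip (PySem.Str.slice ((PySem.List.pyGet? lines (k : Int)).getD "") none (some remaining))], (k : Int) + 1)
    else (selected, (k : Int))

-- ===== PRECONDITION & SPEC =====
def Spec_take_prefix_py (lines : List String) (budget : Int) (out : List String × Int) : Prop := out = take_prefix_py_alt lines budget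
instance (lines : List String) (budget : Int) (out : List String × Int) : Decidable (Spec_take_prefix_py lines budget out) := by unfold Spec_take_prefix_py; infer_instance

-- ===== CLAIM (what is proved, stated in full; the proofs are below) =====
def Claim_equal_take_prefix_py : Prop := ∀ (lines : List String) (budget : Int), Dom_take_prefix_py lines budget → Spec_take_prefix_py lines budget (take_prefix_py lines budget)

-- ===== LEMMAS AND PROOFS =====

theorem strLen_eq (s : String) : PySem.Str.len s = (s.length : Int) := by
  simp [PySem.Str.len]

-- characterisation of A's loop from an arbitrary state, phrased through B's table and cutoff
theorem goA_eq (budget : Int) (lines : List String) : ∀ (idx used : Int) (sel : List String),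
    0 ≤ idx → (sel = [] ↔ idx = 0) →
    takePrefixGoA budget lines idx used sel =
      (let cum := prefixCostsB lines idx used
       let k := cutoffB cum budget
       if k = lines.length then (sel ++ lines, idx + lines.length)
       else
         let usedK := if k = 0 then used else cum.getD (k - 1) 0
         let sep : Int := if idx = 0 ∧ k = 0 then 0 else 1
         let remaining := budget - usedK - sep
         if remaining > 0 then
           (sel ++ lines.take k ++ [PySem.Str.rstrip (PySem.Str.slice (lines.getD k "") none (some remaining))], idx + k + 1)
         else (sel ++ lines.take k, idx + k)) := by
  induction lines with
  | nil =>
    intro idx used sel _ _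
    simp [takePrefixGoA, prefixCostsB, cutoffB]
  | cons line rest ih =>
    intro idx used sel hidx hsel
    have hsep : (if sel.isEmpty then (0:Int) else 1) = (if idx = 0 then 0 else 1) := by
      rcases sel with _ | ⟨s, sel'⟩
      · simp [hsel.mp rfl]
      · have : idx ≠ 0 := fun h => by simpa using hsel.mpr h
        simp [this]
    simp only [takePrefixGoA, prefixCostsB, cutoffB, hsep, strLen_eq]
    by_cases hfit : (used + if idx = 0 then 0 else 1) + (line.length : Int) ≤ budget
    · -- line fits: A recurses; the cutoff counts this line and shifts by one
      simp only [if_pos hfit]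
      rw [ih (idx + 1) _ (sel ++ [line]) (by omega) (by simp; omega)]
      dsimp only
      generalize prefixCostsB rest (idx + 1) ((used + if idx = 0 then 0 else 1) + (line.length : Int)) = cum'
      generalize cutoffB cum' budget = k'
      by_cases hend : k' = rest.length
      · simp only [if_pos hend, if_pos (by simp [hend] : k' + 1 = (line :: rest).length)]
        refine Prod.ext (by simp) ?_
        simp only [List.length_cons]
        omega
      · have hne : ¬ (k' + 1 = (line :: rest).length) := by simp; omega
        simp only [if_neg hend, if_neg hne]
        have hsepA : (if idx + 1 = 0 ∧ k' = 0 then (0:Int) else 1) = 1 :=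
          if_neg (by rintro ⟨h, -⟩; omega)
        have hsepB : (if idx = 0 ∧ k' + 1 = 0 then (0:Int) else 1) = 1 :=
          if_neg (by rintro ⟨-, h⟩; omega)
        have husd : (if k' + 1 = 0 then used
              else (((used + if idx = 0 then 0 else 1) + (line.length : Int)) :: cum').getD (k' + 1 - 1) 0)
            = (if k' = 0 then (used + if idx = 0 then 0 else 1) + (line.length : Int)
              else cum'.getD (k' - 1) 0) := by
          cases k' with
          | zero => simp
          | succ m => simp
        rw [hsepA, hsepB, husd]
        split_ifs <;>
          exact Prod.ext (by simp [List.take_succ_cons, List.append_assoc]) (by push_cast; ring)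
    · -- line does not fit: the cutoff is 0 and A returns here
      simp only [if_neg hfit]
      have h0 : ¬ ((0:Nat) = (line :: rest).length) := by simp
      simp only [if_neg h0]
      norm_num

theorem getD_eq_getD (cum : List Int) (k : Nat) (hk : 0 < k) :
    (PySem.List.pyGet? cum ((k : Int) - 1)).getD 0 = cum.getD (k - 1) 0 := by
  have : ((k : Int) - 1) = ((k - 1 : Nat) : Int) := by omega
  rw [this, PySem.List.pyGet?_natCast, List.getD_eq_getElem?_getD]

-- ===== VERDICT (by name: the statement is the Claim_ definition above) =====
theorem take_prefix_py_spec : Claim_equal_take_prefix_py := by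
  intro lines budget _
  unfold Spec_take_prefix_py take_prefix_py take_prefix_py_alt
  rw [goA_eq budget lines 0 0 [] (by omega) (by simp)]
  simp only [List.nil_append, zero_add]
  by_cases hk0 : cutoffB (prefixCostsB lines 0 0) budget = 0
  · simp [hk0, show PySem.List.pyGet? lines 0 = lines[0]? from by
      simpa using PySem.List.pyGet?_natCast lines 0]
  · have hg := getD_eq_getD (prefixCostsB lines 0 0) (cutoffB (prefixCostsB lines 0 0) budget)
      (Nat.pos_of_ne_zero hk0)
    simp [hk0, hg, PySem.List.pyGet?_natCast, List.getD_eq_getElem?_getD]
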